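-- pv_equiv track=rewrite | github.com/gregoriusseptiano/Dasar-Pemrograman | Tugas Source Code Daspro B2/Pasca-UTS/24060124120026_Gregorius Septiano Ariadi_Praktikum 10/listFunctions.py | NBUnion
-- ===== SOURCE A (Python) =====
-- def FirstElmt(L):
--     if IsEmpty(L):
--         return None
--     else:
--         return L[0]
--
-- def LastElmt(L):
--     if IsEmpty(L):
--         return None
--     else:
--         return L[-1]
--
-- def Tail(L):
--     if IsEmpty(L):
--         return None
--     else:
--         return L[1:]
--
-- def Head(L):
--     if IsEmpty(L):
--         return None
--     else:
--         return L[:-1]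
--
-- def NbElmt(L):
--     if IsEmpty(L):
--         return 0
--     else:
--         return 1 + NbElmt(Tail(L))
--
-- def IsMember(x, L):
--     if IsEmpty(L):
--         return False
--     else:
--         if LastElmt(L) == x:
--             return True
--         else:
--             return (IsMember(x, Head(L)))
--
-- def NBUnion(H1, H2):
--     if IsEmpty(H1):
--         return NbElmt(H2)
--     elif IsEmpty(H2):
--         return NbElmt(H1)
--     else:
--         if IsMember(FirstElmt(H1), H2):
--             return NBUnion(Tail(H1), H2)
--         else:
--             return 1 + NBUnion(Tail(H1), H2)
--
-- def IsEmpty(L):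
--     return L == []
-- ===== SOURCE B (Python) =====
-- def NBUnion(H1, H2):
--     count = len(H2)
--     for x in H1:
--         if x not in H2:
--             count += 1
--     return count
-- ===== Notes on version B (the rewrite author's own statement) =====
-- stated objective: faster
-- what changed: Replaced the recursion on Tail(H1) (with quadratic IsMember/NbElmt recursion on Head) by a single iterative loop over H1 accumulating a count started at len(H2), using plain membership tests.
import Mathlib
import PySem

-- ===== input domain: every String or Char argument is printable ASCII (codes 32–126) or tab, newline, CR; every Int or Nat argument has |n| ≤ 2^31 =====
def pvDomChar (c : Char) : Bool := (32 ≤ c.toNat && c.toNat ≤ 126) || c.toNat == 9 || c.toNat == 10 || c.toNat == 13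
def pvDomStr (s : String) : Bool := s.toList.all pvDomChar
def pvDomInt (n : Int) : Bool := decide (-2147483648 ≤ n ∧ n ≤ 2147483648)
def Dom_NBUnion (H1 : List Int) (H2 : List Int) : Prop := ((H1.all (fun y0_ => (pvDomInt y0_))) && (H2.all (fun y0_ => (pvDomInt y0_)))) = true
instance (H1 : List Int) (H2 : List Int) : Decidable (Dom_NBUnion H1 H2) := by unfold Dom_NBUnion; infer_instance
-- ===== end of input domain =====

-- B replaces A's recursion on Tail(H1) (with recursive IsMember/NbElmt) by one iterative loop
-- accumulating a count started at len(H2); same return value.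

-- ===== PORT A =====
-- NbElmt: recursive length via Tail
def pvNbElmt : List Int → Int
  | [] => 0
  | _ :: t => 1 + pvNbElmt t

-- IsMember: checks LastElmt, recurses on Head (= L[:-1])
def pvIsMember (x : Int) (L : List Int) : Bool :=
  if hL : L = [] then false
  else if L.getLast hL = x then true
  else pvIsMember x L.dropLast
termination_by L.length
decreasing_by
  have h0 : L.length ≠ 0 := by simpa using hL
  simp only [List.length_dropLast]
  omega


def NBUnion (H1 : List Int) (H2 : List Int) : Int :=
  match H1 with
  | [] => pvNbElmt H2
  | x :: t =>
    if H2 = [] then pvNbElmt H1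
    else if pvIsMember x H2 then NBUnion t H2
    else 1 + NBUnion t H2

-- ===== PORT B =====
def NBUnion_alt (H1 : List Int) (H2 : List Int) : Int :=
  H1.foldl (fun count x => if x ∈ H2 then count else count + 1) (H2.length : Int)

-- ===== PRECONDITION & SPEC =====
def Spec_NBUnion (H1 : List Int) (H2 : List Int) (out : Int) : Prop := out = NBUnion_alt H1 H2
instance (H1 : List Int) (H2 : List Int) (out : Int) : Decidable (Spec_NBUnion H1 H2 out) := by unfold Spec_NBUnion; infer_instance

-- ===== CLAIM (what is proved, stated in full; the proofs are below) =====
def Claim_equal_NBUnion : Prop := ∀ (H1 : List Int) (H2 : List Int), Dom_NBUnion H1 H2 → Spec_NBUnion H1 H2 (NBUnion H1 H2)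

-- ===== LEMMAS AND PROOFS =====
theorem pvNbElmt_eq_length (L : List Int) : pvNbElmt L = (L.length : Int) := by
  induction L with
  | nil => simp [pvNbElmt]
  | cons x t ih => simp [pvNbElmt, ih]; omega

theorem pvIsMember_eq_mem (x : Int) (L : List Int) : pvIsMember x L = decide (x ∈ L) := by
  induction L using List.reverseRecOn with
  | nil => simp [pvIsMember]
  | append_singleton t y ih =>
    rw [pvIsMember]
    simp only [List.dropLast_concat, ih, List.concat_ne_nil, dite_false, List.getLast_concat]
    by_cases h : y = x
    · simp [h]
    · simp [h]
      exact fun hxy => absurd hxy.symm h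

theorem foldl_count (H2 : List Int) (H1 : List Int) (c : Int) :
    H1.foldl (fun count x => if x ∈ H2 then count else count + 1) c
      = c + H1.foldl (fun count x => if x ∈ H2 then count else count + 1) 0 := by
  induction H1 generalizing c with
  | nil => simp
  | cons x t ih =>
    simp only [List.foldl_cons]
    rw [ih, ih (if x ∈ H2 then 0 else 0 + 1)]
    split <;> omega

theorem foldl_count_nil (L : List Int) (c : Int) :
    L.foldl (fun count x => if x ∈ ([] : List Int) then count else count + 1) c
      = c + L.length := by
  induction L generalizing c with
  | nil => simp
  | cons x t ih =>
    have ih' := ih (c + 1)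
    simp only [List.foldl_cons, if_neg List.not_mem_nil] at ih' ⊢
    rw [ih']
    simp only [List.length_cons]
    push_cast
    omega

theorem NBUnion_eq (H1 H2 : List Int) : NBUnion H1 H2 = NBUnion_alt H1 H2 := by
  unfold NBUnion_alt
  induction H1 with
  | nil => simp [NBUnion, pvNbElmt_eq_length]
  | cons x t ih =>
    by_cases h2 : H2 = []
    · subst h2
      simp only [NBUnion]
      rw [pvNbElmt_eq_length, foldl_count_nil]
      simp
    · simp only [NBUnion, if_neg h2, pvIsMember_eq_mem, List.foldl_cons]
      by_cases hm : x ∈ H2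
      · simpa [hm] using ih
      · simp only [hm, decide_false, Bool.false_eq_true, if_false]
        rw [ih, foldl_count H2 t ((H2.length : Int)), foldl_count H2 t ((H2.length : Int) + 1)]
        omega

-- ===== VERDICT (by name: the statement is the Claim_ definition above) =====
theorem NBUnion_spec : Claim_equal_NBUnion := by
  intro H1 H2 _
  exact NBUnion_eq H1 H2
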